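-- pv_equiv track=rewrite | github.com/Icexbb/SekaiSubtitle-Python | src/lib/process.py | dialog_body_typer
-- ===== SOURCE A (Python) =====
-- def dialog_body_typer(body: str, char_interval: int = 50):
--     return_char = ["\n", "\\n", "\\N"]
--     for c in return_char:
--         body.replace(c, "\n")
--     body_list = list(body)
--     res = []
--     return_count = 0
--     for index, char in enumerate(body_list):
--         return_count += 1 if char == "\n" else 0
--         res.append(
--             rf"{{\alphaFF\t({char_interval * (index * 2 + 1) + return_count * 300},"
--             rf"{char_interval * (index * 2 + 2) + return_count * 300},1,\alpha0)}}"
--             + (char if char != "\n" else r"\N"))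
--     return "".join(res)
-- ===== SOURCE B (Python) =====
-- def dialog_body_typer(body: str, char_interval: int = 50):
--     # Line-structured decomposition: split on "\n"; every character of line j has
--     # newline count j, and the separator between lines j and j+1 has count j+1.
--     def tag(i, c):
--         return ("{\\alphaFF\\t(%d,%d,1,\\alpha0)}"
--                 % (char_interval * (2 * i + 1) + c * 300,
--                    char_interval * (2 * i + 2) + c * 300))
--     lines = body.split("\n")
--     out = []
--     i = 0
--     for j, line in enumerate(lines):
--         for ch in line:
--             out.append(tag(i, j) + ch)
--             i += 1
--         if j + 1 < len(lines):
--             out.append(tag(i, j + 1) + "\\N")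
--             i += 1
--     return "".join(out)
-- ===== Notes on version B (the rewrite author's own statement) =====
-- stated objective: alternative
-- what changed: Replaces A's single per-character loop threading a running newline counter by a line-structured algorithm: split the body on newlines, then emit each line's characters with count j and each separator with count j+1, tracking only the global index.
import Mathlib
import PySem

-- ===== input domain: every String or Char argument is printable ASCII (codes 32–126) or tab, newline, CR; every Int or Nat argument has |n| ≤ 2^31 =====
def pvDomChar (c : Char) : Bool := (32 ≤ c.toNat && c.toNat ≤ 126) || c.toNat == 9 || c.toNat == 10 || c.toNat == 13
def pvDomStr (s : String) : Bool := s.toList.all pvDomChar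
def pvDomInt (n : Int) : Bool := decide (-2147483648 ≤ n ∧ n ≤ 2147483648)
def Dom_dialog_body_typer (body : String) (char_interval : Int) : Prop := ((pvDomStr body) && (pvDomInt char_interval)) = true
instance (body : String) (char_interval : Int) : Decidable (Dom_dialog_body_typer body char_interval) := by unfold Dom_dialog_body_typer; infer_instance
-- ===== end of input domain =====

-- B replaces A's single accumulator-threaded per-character loop (running newline counter)
-- by a line-structured algorithm: split the body on "\n", then every character of line j
-- carries newline count j and each separator carries count j+1; same cost, different algorithm.
-- (A's three `body.replace` calls are no-ops on an immutable str and have no port.)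

-- ===== PORT A =====
def dialog_body_typer (body : String) (char_interval : Int) : String :=
  let body_list := body.toList
  let fin := (PySem.List.enumerate body_list 0).foldl
    (fun (st : Int × List String) (p : Int × Char) =>
      let return_count := st.1 + (if p.2 = '\n' then 1 else 0)
      (return_count,
        st.2 ++ ["{\\alphaFF\\t(" ++
          PySem.Int.toStr (char_interval * (p.1 * 2 + 1) + return_count * 300) ++ "," ++
          PySem.Int.toStr (char_interval * (p.1 * 2 + 2) + return_count * 300) ++
          ",1,\\alpha0)}" ++
          (if p.2 ≠ '\n' then String.mk [p.2] else "\\N")]))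
    (0, [])
  PySem.Str.join "" fin.2

-- ===== PORT B =====
-- Source B's tag(i, c)
def pvTag (char_interval i c : Int) : String :=
  "{\\alphaFF\\t(" ++
    PySem.Int.toStr (char_interval * (2 * i + 1) + c * 300) ++ "," ++
    PySem.Int.toStr (char_interval * (2 * i + 2) + c * 300) ++
    ",1,\\alpha0)}"

-- Source B's inner `for ch in line` loop
def pvEmitLine (char_interval : Int) (line : List Char) (i j : Int) : List String :=
  match line with
  | [] => []
  | ch :: t => (pvTag char_interval i j ++ String.mk [ch]) :: pvEmitLine char_interval t (i + 1) j

-- Source B's outer `for j, line in enumerate(lines)` loop (with its non-last-line separator)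
def pvEmitLines (char_interval : Int) (lines : List (List Char)) (i j : Int) : List String :=
  match lines with
  | [] => []
  | [l] => pvEmitLine char_interval l i j
  | l :: l2 :: rest =>
      pvEmitLine char_interval l i j ++
        (pvTag char_interval (i + (l.length : Int)) (j + 1) ++ "\\N") ::
          pvEmitLines char_interval (l2 :: rest) (i + (l.length : Int) + 1) (j + 1)

-- Python body.split("\n") is List.splitOn '\n' on the characters
def dialog_body_typer_alt (body : String) (char_interval : Int) : String :=
  let lines := body.toList.splitOn '\n'
  PySem.Str.join "" (pvEmitLines char_interval lines 0 0)

-- ===== PRECONDITION & SPEC =====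
def Spec_dialog_body_typer (body : String) (char_interval : Int) (out : String) : Prop := out = dialog_body_typer_alt body char_interval
instance (body : String) (char_interval : Int) (out : String) : Decidable (Spec_dialog_body_typer body char_interval out) := by unfold Spec_dialog_body_typer; infer_instance

-- ===== CLAIM (what is proved, stated in full; the proofs are below) =====
def Claim_equal_dialog_body_typer : Prop := ∀ (body : String) (char_interval : Int), Dom_dialog_body_typer body char_interval → Spec_dialog_body_typer body char_interval (dialog_body_typer body char_interval)

-- ===== LEMMAS AND PROOFS =====

-- reference: the list of tag strings, indexed from s with running newline count c0
def pvRef (ci : Int) : List Char → Int → Int → List String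
  | [], _, _ => []
  | ch :: t, s, c0 =>
      let c := if ch = '\n' then c0 + 1 else c0
      (pvTag ci s c ++ (if ch = '\n' then "\\N" else String.mk [ch])) :: pvRef ci t (s + 1) c

theorem pvA_fold (ci : Int) (l : List Char) (s c0 : Int) (acc : List String) :
    (PySem.List.enumerate l s).foldl
      (fun (st : Int × List String) (p : Int × Char) =>
        let return_count := st.1 + (if p.2 = '\n' then 1 else 0)
        (return_count,
          st.2 ++ ["{\\alphaFF\\t(" ++
            PySem.Int.toStr (ci * (p.1 * 2 + 1) + return_count * 300) ++ "," ++
            PySem.Int.toStr (ci * (p.1 * 2 + 2) + return_count * 300) ++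
            ",1,\\alpha0)}" ++
            (if p.2 ≠ '\n' then String.mk [p.2] else "\\N")]))
      (c0, acc)
    = ((if l.count '\n' = 0 then c0 else c0 + l.count '\n'), acc ++ pvRef ci l s c0) := by
  induction l generalizing s c0 acc with
  | nil => simp [PySem.List.enumerate_nil, pvRef]
  | cons ch t ih =>
      rw [PySem.List.enumerate_cons, List.foldl_cons, ih]
      by_cases h : ch = '\n' <;>
        simp [pvRef, pvTag, h, mul_comm]; omega

-- one character prepended to the first line shifts everything by one index
theorem pvEmitLines_consHead (ci : Int) (ch : Char) (h : List Char)
    (rest : List (List Char)) (s c : Int) :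
    pvEmitLines ci ((ch :: h) :: rest) s c
    = (pvTag ci s c ++ String.mk [ch]) :: pvEmitLines ci (h :: rest) (s + 1) c := by
  cases rest with
  | nil => simp [pvEmitLines, pvEmitLine]
  | cons l2 r =>
      simp only [pvEmitLines, pvEmitLine, List.length_cons]
      push_cast
      rw [show s + ((h.length : Int) + 1) = s + 1 + (h.length : Int) from by ring]
      simp

-- B on the split lines equals the per-character reference
theorem pvB_lines (ci : Int) (l : List Char) (s c : Int) :
    pvEmitLines ci (l.splitOn '\n') s c = pvRef ci l s c := by
  induction l generalizing s c with
  | nil => simp [List.splitOn, List.splitOnP, List.splitOnP.go, pvEmitLines, pvEmitLine, pvRef]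
  | cons ch t ih =>
      by_cases h : ch = '\n'
      · subst h
        have hsplit : ('\n' :: t).splitOn '\n' = [] :: t.splitOn '\n' := by
          simp [List.splitOn, List.splitOnP_cons]
        rw [hsplit]
        obtain ⟨hd, rest, hr⟩ : ∃ hd rest, t.splitOn '\n' = hd :: rest := by
          rcases hx : t.splitOn '\n' with _ | ⟨hd, rest⟩
          · exact absurd hx (by simpa [List.splitOn] using List.splitOnP_ne_nil (fun x => x == '\n') t)
          · exact ⟨hd, rest, rfl⟩
        rw [hr]
        show pvEmitLines ci ([] :: hd :: rest) s c = _
        simp only [pvEmitLines, pvEmitLine, List.length_nil, Int.natCast_zero, add_zero,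
          List.nil_append]
        rw [← hr, ih]
        simp [pvRef]
      · have hsplit : (ch :: t).splitOn '\n' = (t.splitOn '\n').modifyHead (List.cons ch) := by
          simp [List.splitOn, List.splitOnP_cons, h]
        rw [hsplit]
        obtain ⟨hd, rest, hr⟩ : ∃ hd rest, t.splitOn '\n' = hd :: rest := by
          rcases hx : t.splitOn '\n' with _ | ⟨hd, rest⟩
          · exact absurd hx (by simpa [List.splitOn] using List.splitOnP_ne_nil (fun x => x == '\n') t)
          · exact ⟨hd, rest, rfl⟩
        rw [hr, List.modifyHead_cons, pvEmitLines_consHead, ← hr, ih]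
        simp [pvRef, h]

-- ===== VERDICT (by name: the statement is the Claim_ definition above) =====
theorem dialog_body_typer_spec : Claim_equal_dialog_body_typer := by
  intro body ci _
  show dialog_body_typer body ci = dialog_body_typer_alt body ci
  unfold dialog_body_typer dialog_body_typer_alt
  dsimp only
  rw [pvA_fold, pvB_lines]
  simp
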